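-- pv_equiv track=rewrite | github.com/P0cL4bs/wifipumpkin3 | venv/lib/python3.6/site-packages/dhcplib/rfc.py | rfc3046_decode
-- ===== SOURCE A (Python) =====
-- def rfc3046_decode(s):
--     """
--     Extracts sub-options from an RFC3046 option (82).
--
--     :param sequence s: The option's raw data.
--     :return dict: The sub-options, as byte-lists, keyed by ID.
--     """
--     sub_options = {}
--     while s:
--         id = s.pop(0)
--         length = s.pop(0)
--         sub_options[id] = s[:length]
--         s = s[length:]
--     return sub_options
-- ===== SOURCE B (Python) =====
-- def rfc3046_decode(s):
--     """Single pass over s with an integer cursor; each value is sliced directly.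
--
--     Does not mutate the caller's list.
--     """
--     sub_options = {}
--     i = 0
--     while i < len(s):
--         id = s[i]
--         length = s[i + 1]
--         sub_options[id] = s[i + 2:i + 2 + length]
--         i += 2 + length
--     return sub_options
-- ===== Notes on version B (the rewrite author's own statement) =====
-- stated objective: alternative
-- what changed: Replaces A's destructive pop(0)/list-reslicing loop with a single non-mutating pass over the original list using an integer cursor; Pre_ excludes malformed streams (a truncated chunk missing its length byte, where A raises IndexError, and negative length fields, where A's value is an accident of Python negative-slice semantics and B raises or loops).
-- outside the precondition, e.g. on rfc3046_decode([1, -1]): A returns {1: []}, B raises IndexError; on rfc3046_decode([5]): A raises IndexError, B raises IndexError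
import Mathlib
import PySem

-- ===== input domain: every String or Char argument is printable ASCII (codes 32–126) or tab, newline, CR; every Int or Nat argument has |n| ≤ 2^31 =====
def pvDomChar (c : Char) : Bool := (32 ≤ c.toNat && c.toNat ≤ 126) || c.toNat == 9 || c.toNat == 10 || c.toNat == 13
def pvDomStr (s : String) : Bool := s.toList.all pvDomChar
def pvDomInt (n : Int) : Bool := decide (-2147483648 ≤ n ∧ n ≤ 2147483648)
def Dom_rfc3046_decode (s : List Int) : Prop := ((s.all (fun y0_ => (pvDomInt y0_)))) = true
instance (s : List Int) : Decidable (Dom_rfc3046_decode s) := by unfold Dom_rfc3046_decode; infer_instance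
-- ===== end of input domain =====

-- B replaces A's pop(0)/re-slice loop by one non-mutating pass with an integer cursor;
-- return values proved equal on well-formed streams (Pre_). Side effect note: Python A
-- consumes the caller's list in place, B does not mutate it — the claim is about the
-- return value only.

-- ===== PORT A =====
-- A's while loop: pop id, pop length, record s[:length], continue on s[length:].
-- The [_] case is where Python raises IndexError (pop on empty); outside Pre_.
-- termination argument for loopA (cited by name in decreasing_by)
theorem pv_sliceA_len_lt (x y : Int) (rest : List Int) (len : Int) :
    (PySem.List.slice rest (some len) none).length < (x :: y :: rest).length := by
  simp [PySem.List.slice_some_none]; omega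

def rfc3046_loopA : List Int → PySem.Dict Int (List Int) → PySem.Dict Int (List Int)
  | [], d => d
  | [_], d => d
  | id :: len :: rest, d =>
      rfc3046_loopA (PySem.List.slice rest (some len) none)
        (d.insert id (PySem.List.slice rest none (some len)))
termination_by s _ => s.length
decreasing_by
  exact pv_sliceA_len_lt id len rest len

def rfc3046_decode (s : List Int) : List (Int × List Int) :=
  (rfc3046_loopA s PySem.Dict.empty).items

-- ===== PORT B =====
-- B's while loop with cursor i; fuel only makes the recursion total (inside Pre_ the
-- cursor advances by ≥ 2 each step, so s.length + 1 steps always suffice). The `none`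
-- match arms are where Python B raises IndexError; outside Pre_.
def rfc3046_loopB : Nat → List Int → Int → Int → PySem.Dict Int (List Int) →
    PySem.Dict Int (List Int)
  | 0, _, _, _, d => d
  | fuel + 1, s, n, i, d =>
      if i < n then
        match PySem.List.pyGet? s i, PySem.List.pyGet? s (i + 1) with
        | some id, some length =>
            rfc3046_loopB fuel s n (i + 2 + length)
              (d.insert id (PySem.List.slice s (some (i + 2)) (some (i + 2 + length))))
        | _, _ => d
      else d

def rfc3046_decode_alt (s : List Int) : List (Int × List Int) :=
  (rfc3046_loopB (s.length + 1) s (s.length : Int) 0 PySem.Dict.empty).items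

-- ===== PRECONDITION & SPEC =====
-- Pre_ is the TLV grammar of well-formed sub-option streams: each chunk has an id byte
-- and a NONNEGATIVE length byte. It excludes the malformed inputs: a truncated chunk
-- missing its length byte (Python A raises IndexError there, and so does B) and a
-- negative length field (impossible for byte data; A's value there is an accident of
-- Python's negative-slice semantics, and B raises IndexError or does not terminate).
-- structural recursion on a length counter (each chunk consumes at least two elements,
-- so s.length steps always suffice; the counter only makes the grammar kernel-computable)
def rfc3046_wf : Nat → List Int → Bool
  | _, [] => true
  | _, [_] => false
  | 0, _ :: _ :: _ => false
  | fuel + 1, _ :: len :: rest =>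
      decide (0 ≤ len) && rfc3046_wf fuel (PySem.List.slice rest (some len) none)

def Pre_rfc3046_decode (s : List Int) : Prop := rfc3046_wf s.length s = true
instance (s : List Int) : Decidable (Pre_rfc3046_decode s) := by
  unfold Pre_rfc3046_decode; infer_instance

def pvWitness_rfc3046_decode : List Int := [1, 2, 10, 20, 5, 0]

def Spec_rfc3046_decode (s : List Int) (out : List (Int × List Int)) : Prop := out = rfc3046_decode_alt s
instance (s : List Int) (out : List (Int × List Int)) : Decidable (Spec_rfc3046_decode s out) := by unfold Spec_rfc3046_decode; infer_instance

-- ===== CLAIM =====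
def Claim_equal_rfc3046_decode : Prop := ∀ (s : List Int), Dom_rfc3046_decode s → Pre_rfc3046_decode s → Spec_rfc3046_decode s (rfc3046_decode s)

-- ===== LEMMAS AND PROOFS =====

-- Loop invariant: with enough fuel, B's cursor loop at position i computes A's loop
-- on the remaining (well-formed) list.
theorem rfc3046_loop_eq (fuel : Nat) (s : List Int) (i : Int)
    (d : PySem.Dict Int (List Int)) (g : Nat) (h0 : 0 ≤ i)
    (hw : rfc3046_wf g (s.drop i.toNat) = true)
    (hf : s.length - i.toNat < fuel) :
    rfc3046_loopB fuel s (s.length : Int) i d = rfc3046_loopA (s.drop i.toNat) d := by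
  induction fuel generalizing i d g with
  | zero => omega
  | succ fuel ih =>
    rw [rfc3046_loopB]
    by_cases hlt : i < (s.length : Int)
    · rw [if_pos hlt]
      have hp : i.toNat < s.length := by omega
      have hget1 : PySem.List.pyGet? s i = some s[i.toNat] :=
        PySem.List.pyGet?_eq_some_getElem s h0 hlt
      by_cases h2 : i + 1 < (s.length : Int)
      · have hp2 : i.toNat + 1 < s.length := by omega
        have hget2 : PySem.List.pyGet? s (i + 1) = some (s[i.toNat + 1]'hp2) := by
          rw [PySem.List.pyGet?_eq_some_getElem s (by omega) h2]
          simp only [show (i + 1).toNat = i.toNat + 1 from by omega]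
        have hdrop : s.drop i.toNat = s[i.toNat] :: s[i.toNat + 1] :: s.drop (i.toNat + 2) := by
          rw [List.drop_eq_getElem_cons hp, List.drop_eq_getElem_cons hp2]
        simp only [hget1, hget2]
        set len : Int := s[i.toNat + 1] with hlendef
        set rest : List Int := s.drop (i.toNat + 2) with hrest
        rw [hdrop, rfc3046_loopA]
        rw [hdrop] at hw
        cases g with
        | zero => exact absurd hw (by simp [rfc3046_wf])
        | succ g =>
        rw [rfc3046_wf] at hw
        simp only [Bool.and_eq_true, decide_eq_true_eq] at hw
        obtain ⟨hlen, hw'⟩ := hw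
        have hval : PySem.List.slice s (some (i + 2)) (some (i + 2 + len)) =
            PySem.List.slice rest none (some len) := by
          rw [PySem.List.slice_toNat s (by omega) (by omega),
            PySem.List.slice_to rest hlen]
          congr 1
          · omega
          · rw [hrest]
            congr 1
            omega
        have hnext : s.drop (i + 2 + len).toNat = PySem.List.slice rest (some len) none := by
          rw [PySem.List.slice_from rest hlen, hrest, List.drop_drop]
          congr 1
          omega
        rw [hval, ← hnext]
        apply ih (i + 2 + len) _ g (by omega)
        · rw [hnext]; exact hw'
        · have : i.toNat + 2 ≤ (i + 2 + len).toNat := by omega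
          omega
      · exfalso
        have hdrop : s.drop i.toNat = [s[i.toNat]] := by
          rw [List.drop_eq_getElem_cons hp, List.drop_eq_nil_of_le (by omega)]
        rw [hdrop] at hw
        simp [rfc3046_wf] at hw
    · rw [if_neg hlt]
      have : s.drop i.toNat = [] := List.drop_eq_nil_of_le (by omega)
      rw [this, rfc3046_loopA]

-- ===== VERDICT =====
theorem rfc3046_decode_spec : Claim_equal_rfc3046_decode := by
  intro s _ hpre
  unfold Spec_rfc3046_decode rfc3046_decode rfc3046_decode_alt
  rw [rfc3046_loop_eq (s.length + 1) s 0 PySem.Dict.empty s.length (le_refl 0)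
    (by simpa using hpre) (by omega)]
  simp
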